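-- pv_equiv track=rewrite | github.com/billyean/acadia | python/list/cross_count.py | number_of_cross
-- ===== SOURCE A (Python) =====
-- def number_of_cross(list):
--     sl = list[:]
--     sl.sort()
--
--     noCross = 0
--
--     for i in range(len(list)):
--         if sl[i] == list[i]:
--             allLess = True
--             for j in range(i):
--                 if list[j] > list[i]:
--                     allLess = False
--                     break
--
--             if allLess:
--                 noCross = noCross + 1
--
--     return len(list) - noCross
-- ===== SOURCE B (Python) =====
-- def number_of_cross(list):
--     no_cross = 0
--     running = None
--     for s, x in zip(sorted(list), list):
--         if s == x and (running is None or running <= x):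
--             no_cross += 1
--         if running is None or x > running:
--             running = x
--     return len(list) - no_cross
-- ===== Notes on version B (the rewrite author's own statement) =====
-- stated objective: faster
-- what changed: replaces the O(n^2) inner rescan of all previous elements by a running prefix maximum carried through a single zip pass over (sorted, original), making the scan after sorting linear
import Mathlib
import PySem

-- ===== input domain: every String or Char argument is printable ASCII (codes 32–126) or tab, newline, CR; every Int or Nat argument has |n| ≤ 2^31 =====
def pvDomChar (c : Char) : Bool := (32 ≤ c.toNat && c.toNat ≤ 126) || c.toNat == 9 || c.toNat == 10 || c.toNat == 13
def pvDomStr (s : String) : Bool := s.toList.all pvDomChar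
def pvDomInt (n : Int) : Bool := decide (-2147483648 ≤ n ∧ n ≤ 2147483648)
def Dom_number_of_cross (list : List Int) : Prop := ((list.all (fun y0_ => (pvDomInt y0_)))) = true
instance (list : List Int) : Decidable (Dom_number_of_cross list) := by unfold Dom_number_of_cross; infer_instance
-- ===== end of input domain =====

-- B replaces A's O(n^2) inner rescan of previous elements by a running prefix maximum in one zip pass (after sorting); equivalence proved on all inputs.


-- ===== PORT A =====
-- sl = sorted(list); for i in range(len): if sl[i]==list[i] and all previous list[j] <= list[i]: noCross += 1
def number_of_cross (list : List Int) : Int :=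
  let sl := PySem.List.sorted list (fun y => y) false
  let noCross := (PySem.List.pyRange 0 (list.length : Int) 1).foldl (fun noCross i =>
    if PySem.List.pyGetD sl i 0 = PySem.List.pyGetD list i 0 then
      let allLess := (PySem.List.pyRange 0 i 1).all (fun j =>
        !(decide (PySem.List.pyGetD list j 0 > PySem.List.pyGetD list i 0)))
      if allLess then noCross + 1 else noCross
    else noCross) 0
  (list.length : Int) - noCross

-- ===== PORT B =====
-- one pass over zip(sorted(list), list) with a running prefix maximum
def number_of_cross_alt (list : List Int) : Int :=
  let sl := PySem.List.sorted list (fun y => y) false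
  let res := (sl.zip list).foldl (fun (st : Option Int × Int) (p : Int × Int) =>
    let ok : Bool := match st.1 with | none => true | some m => decide (m ≤ p.2)
    let c := if p.1 = p.2 ∧ ok = true then st.2 + 1 else st.2
    let r := match st.1 with | none => some p.2 | some m => if p.2 > m then some p.2 else some m
    (r, c)) (none, 0)
  (list.length : Int) - res.2

-- ===== PRECONDITION & SPEC =====
def Spec_number_of_cross (list : List Int) (out : Int) : Prop := out = number_of_cross_alt list
instance (list : List Int) (out : Int) : Decidable (Spec_number_of_cross list out) := by unfold Spec_number_of_cross; infer_instance

-- ===== CLAIM (what is proved, stated in full; the proofs are below) =====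
def Claim_equal_number_of_cross : Prop := ∀ (list : List Int), Dom_number_of_cross list → Spec_number_of_cross list (number_of_cross list)

-- ===== LEMMAS AND PROOFS =====

-- B's fold step
def pvStepB (st : Option Int × Int) (p : Int × Int) : Option Int × Int :=
  let ok : Bool := match st.1 with | none => true | some m => decide (m ≤ p.2)
  let c := if p.1 = p.2 ∧ ok = true then st.2 + 1 else st.2
  let r := match st.1 with | none => some p.2 | some m => if p.2 > m then some p.2 else some m
  (r, c)

-- running max of a prefix, as B maintains it
def pvRMax (pre : List Int) : Option Int :=
  pre.foldl (fun r x => match r with | none => some x | some m => if x > m then some x else some m) none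

def pvOk (r : Option Int) (x : Int) : Bool := match r with | none => true | some m => decide (m ≤ x)

-- the common count: positions where sorted and original agree and all earlier originals are ≤
def pvCount (ps : List (Int × Int)) (pre : List Int) : Int :=
  match ps with
  | [] => 0
  | (s, x) :: ps' => (if s = x ∧ pre.all (fun y => decide (y ≤ x)) then 1 else 0) + pvCount ps' (pre ++ [x])

theorem pvOk_foldl (ys : List Int) (x : Int) : ∀ r : Option Int,
    pvOk (ys.foldl (fun r x => match r with | none => some x | some m => if x > m then some x else some m) r) x
      = (pvOk r x && ys.all (fun y => decide (y ≤ x))) := by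
  induction ys with
  | nil => intro r; simp
  | cons y ys ih =>
    intro r
    simp only [List.foldl_cons, List.all_cons, ih]
    cases r with
    | none => simp [pvOk]
    | some m =>
      simp only [pvOk]
      by_cases hmx : m ≤ x <;> by_cases hyx : y ≤ x
      · by_cases hy : y > m <;> simp [hy, hmx, hyx]
      · by_cases hy : y > m
        · simp [hy, hmx, hyx]
        · exact absurd (by omega : y ≤ x) hyx
      · have hy : ¬ y > m := by omega
        simp [hy, hmx, hyx]
      · by_cases hy : y > m <;> simp [hy, hmx, hyx]

theorem pvRMax_ok (pre : List Int) (x : Int) :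
    pvOk (pvRMax pre) x = pre.all (fun y => decide (y ≤ x)) := by
  simpa [pvRMax, pvOk] using pvOk_foldl pre x none

theorem pvRMax_append (pre : List Int) (x : Int) :
    pvRMax (pre ++ [x]) = (match pvRMax pre with | none => some x | some m => if x > m then some x else some m) := by
  simp [pvRMax, List.foldl_append]

theorem pvFoldB_eq_count (ps : List (Int × Int)) : ∀ (pre : List Int) (c : Int),
    (ps.foldl pvStepB (pvRMax pre, c)).2 = c + pvCount ps pre := by
  induction ps with
  | nil => intro pre c; simp [pvCount]
  | cons p ps ih =>
    intro pre c
    obtain ⟨s, x⟩ := p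
    have hstep : pvStepB (pvRMax pre, c) (s, x)
        = (pvRMax (pre ++ [x]), c + (if s = x ∧ pre.all (fun y => decide (y ≤ x)) then 1 else 0)) := by
      simp only [pvStepB, pvRMax_append]
      have hok : (match pvRMax pre with | none => true | some m => decide (m ≤ x)) = pvOk (pvRMax pre) x := rfl
      rw [hok, pvRMax_ok]
      by_cases h2 : ∀ y ∈ pre, y ≤ x
      · by_cases hs : s = x <;> simp [hs, if_pos h2]
      · by_cases hs : s = x <;> simp [hs, if_neg h2]
    simp only [List.foldl_cons, hstep, ih]
    simp [pvCount]; ring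

-- relating the index-based inner scan of A to the processed prefix
theorem pvRangeAllTake (l : List Int) (k : Nat) (hk : k ≤ l.length) (p : Int → Bool) :
    (List.range k).all (fun j => p (l.getD j 0)) = (l.take k).all p := by
  rw [Bool.eq_iff_iff]
  simp only [List.all_eq_true, List.mem_range]
  constructor
  · intro h y hy
    rw [List.mem_iff_getElem] at hy
    obtain ⟨i, hi, rfl⟩ := hy
    have hik : i < k := by
      have := List.length_take (l := l) (i := k); omega
    have hil : i < l.length := lt_of_lt_of_le hik hk
    have hgl : (l.take k)[i] = l[i] := List.getElem_take
    rw [hgl, ← List.getD_eq_getElem l 0 hil]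
    exact h i hik
  · intro h j hj
    have hjl : j < l.length := lt_of_lt_of_le hj hk
    rw [List.getD_eq_getElem l 0 hjl]
    refine h _ ?_
    rw [List.mem_iff_getElem]
    exact ⟨j, by simp [hj, hjl], List.getElem_take⟩

-- A's count from offset k equals pvCount of the zipped suffixes with prefix l.take k
theorem pvA_count (sl l : List Int) (hlen : sl.length = l.length) :
    ∀ (d k : Nat) (c : Int), k + d = l.length →
    ((PySem.List.pyRange (k : Int) (l.length : Int) 1).foldl (fun noCross i =>
      if PySem.List.pyGetD sl i 0 = PySem.List.pyGetD l i 0 then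
        if (PySem.List.pyRange 0 i 1).all (fun j =>
            !(decide (PySem.List.pyGetD l j 0 > PySem.List.pyGetD l i 0))) then noCross + 1 else noCross
      else noCross) c)
      = c + pvCount ((sl.drop k).zip (l.drop k)) (l.take k) := by
  intro d
  induction d with
  | zero =>
    intro k c hk
    have hk' : k = l.length := by omega
    subst hk'
    rw [PySem.List.pyRange_one_eq_nil (le_refl _)]
    simp [pvCount, List.drop_length]
  | succ d ih =>
    intro k c hk
    have hkl : k < l.length := by omega
    have hks : k < sl.length := by omega
    rw [PySem.List.pyRange_one_cons (by exact_mod_cast hkl), List.foldl_cons]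
    have hinner : (PySem.List.pyRange 0 (k : Int) 1).all (fun j =>
        !(decide (PySem.List.pyGetD l j 0 > PySem.List.pyGetD l (k : Int) 0)))
        = (l.take k).all (fun y => decide (y ≤ l[k])) := by
      rw [PySem.List.pyRange_zero_nat, List.all_map]
      have heq : ((fun j => !(decide (PySem.List.pyGetD l j 0 > PySem.List.pyGetD l (k : Int) 0))) ∘ (fun (j : Nat) => (j : Int)))
          = (fun (j : Nat) => decide (l.getD j 0 ≤ l[k])) := by
        funext j
        simp only [Function.comp_apply, PySem.List.pyGetD_natCast, gt_iff_lt,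
          List.getD_eq_getElem l 0 hkl, ← decide_not, not_lt]
      rw [heq, pvRangeAllTake l k (le_of_lt hkl) (fun y => decide (y ≤ l[k]))]
    have hget : PySem.List.pyGetD sl (k : Int) 0 = sl[k] := by
      rw [PySem.List.pyGetD_natCast, List.getD_eq_getElem sl 0 hks]
    have hgetl : PySem.List.pyGetD l (k : Int) 0 = l[k] := by
      rw [PySem.List.pyGetD_natCast, List.getD_eq_getElem l 0 hkl]
    have hdropz : (sl.drop k).zip (l.drop k)
        = (sl[k], l[k]) :: ((sl.drop (k+1)).zip (l.drop (k+1))) := by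
      rw [List.drop_eq_getElem_cons hks, List.drop_eq_getElem_cons hkl, List.zip_cons_cons]
    have htake : l.take (k+1) = l.take k ++ [l[k]] := by
      rw [List.take_add_one]; simp [hkl]
    have hrec := ih (k+1) (if sl[k] = l[k] ∧ (l.take k).all (fun y => decide (y ≤ l[k])) then c + 1 else c) (by omega)
    push_cast at hrec
    rw [hinner, hget, hgetl]
    have hstep : (if sl[k] = l[k] then
        if (l.take k).all (fun y => decide (y ≤ l[k])) then c + 1 else c
      else c) = (if sl[k] = l[k] ∧ (l.take k).all (fun y => decide (y ≤ l[k])) then c + 1 else c) := by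
      by_cases h1 : sl[k] = l[k] <;> by_cases h2 : (l.take k).all (fun y => decide (y ≤ l[k])) = true <;>
        simp [h1, h2]
    rw [hstep, hrec, hdropz]
    simp only [pvCount, htake]
    by_cases h : sl[k] = l[k] ∧ ((l.take k).all (fun y => decide (y ≤ l[k]))) = true
    · rw [if_pos h, if_pos h]; ring
    · rw [if_neg h, if_neg h]; ring

theorem number_of_cross_spec : Claim_equal_number_of_cross := by
  intro l _
  unfold Spec_number_of_cross
  simp only [number_of_cross, number_of_cross_alt]
  have hlen : (PySem.List.sorted l (fun y => y) false).length = l.length :=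
    PySem.List.length_sorted l (fun y => y) false
  have hA := pvA_count (PySem.List.sorted l (fun y => y) false) l hlen l.length 0 0 (by omega)
  push_cast at hA
  simp only [List.drop_zero, List.take_zero] at hA
  have hB2 := pvFoldB_eq_count ((PySem.List.sorted l (fun y => y) false).zip l) [] 0
  have hnil : pvRMax [] = none := rfl
  rw [hnil] at hB2
  have hfun : (fun (st : Option Int × Int) (p : Int × Int) =>
      let ok : Bool := match st.1 with | none => true | some m => decide (m ≤ p.2)
      let c := if p.1 = p.2 ∧ ok = true then st.2 + 1 else st.2
      let r := match st.1 with | none => some p.2 | some m => if p.2 > m then some p.2 else some m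
      (r, c)) = pvStepB := rfl
  rw [hfun, hB2, hA]
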